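-- pv_equiv track=rewrite | github.com/VarGun/Algorithm | 프로그래머스/1/340198. ［PCCE 기출문제］ 10번 ／ 공원/［PCCE 기출문제］ 10번 ／ 공원.py | gun
-- ===== SOURCE A (Python) =====
-- from collections import deque
--
-- def cal_dis(y, x, park):
--
--     dis_y = 1
--     dis_x = 1
--
--     for i in range(y + 1, len(park)):
--         if(park[i][x] == '-1'):
--             dis_y += 1
--         else:
--             break
--
--     for i in range(x + 1, len(park[0])):
--         if(park[y][i] == '-1'):
--             dis_x += 1
--         else:
--             break
--
--     return [dis_y, dis_x]
--
-- def search(y, x, gugu, park, dy, dx):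
--     visited = [[False for _ in range(gugu)] for _ in range(gugu)]
--     q = deque()
--     q.append([y, x])
--     visited[0][0] = True
--     while q:
--         head = q.popleft()
--         yy = head[0]
--         xx = head[1]
--         for i in range(4):
--             ny = yy + dy[i]
--             nx = xx + dx[i]
--             if(y <= ny < y + gugu and x <= nx < x + gugu and visited[ny - y][nx - x] == False):
--                 if(park[ny][nx] == '-1'):
--                     q.append([ny, nx])
--                     visited[ny - y][nx - x] = True
--                 else:
--                     return False
--     return True
--
-- def gun(y, x, park, dy, dx):
--     cal = cal_dis(y, x, park)
--     gugu = min(cal[0], cal[1]) # 둘 중 더 짧은 거리까지만 돌면 됨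
--     if(gugu == 1):
--         return 1
--
--     while gugu:
--         res = search(y, x, gugu, park, dy, dx)
--         if(res == True):
--             return gugu
--         gugu -= 1
--
--     return gugu
-- ===== SOURCE B (Python) =====
-- def arm(vals):
--     # length of the leading all-'-1' prefix, recursively
--     if vals and vals[0] == '-1':
--         return 1 + arm(vals[1:])
--     return 0
--
-- def clear(y, x, g, park, moves):
--     # saturate the set of cells reachable from (y, x) through '-1' cells of the g x g square
--     reach = {(y, x)}
--     while True:
--         grown = reach | {(cy + my, cx + mx)
--                          for (cy, cx) in reach for (my, mx) in moves
--                          if y <= cy + my < y + g and x <= cx + mx < x + g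
--                          and park[cy + my][cx + mx] == '-1'}
--         if len(grown) == len(reach):
--             break
--         reach = grown
--     # the square is usable iff every in-square neighbour of a reachable cell is '-1'
--     # (the starting cell itself is never required to be '-1')
--     return all((cy + my, cx + mx) == (y, x) or park[cy + my][cx + mx] == '-1'
--                for (cy, cx) in reach for (my, mx) in moves
--                if y <= cy + my < y + g and x <= cx + mx < x + g)
--
-- def gun(y, x, park, dy, dx):
--     below = [park[i][x] for i in range(y + 1, len(park))]
--     right = [park[y][j] for j in range(x + 1, len(park[0]))]
--     best = 1 + min(arm(below), arm(right))
--     if best == 1: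
--         return 1
--     moves = list(zip(dy, dx))[:4]
--     return next((g for g in range(best, 0, -1) if clear(y, x, g, park, moves)), 0)
-- ===== Notes on version B (the rewrite author's own statement) =====
-- stated objective: alternative
-- what changed: replaces the per-size BFS (deque + g x g visited matrix + early abort inside the scan) by a set-saturation fixpoint (grown in whole rounds, stopped by a cardinality test) followed by one global check of all in-square neighbours, replaces the counting for-else distance loops by recursive prefix-counting over eagerly extracted row/column value lists, and replaces the descending while loop by next() over a generator on range(best,0,-1)
-- outside the precondition, e.g. on gun(0, 0, [['a', 'b'], ['c']], [], []): A returns 1, B returns 1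
import Mathlib
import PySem

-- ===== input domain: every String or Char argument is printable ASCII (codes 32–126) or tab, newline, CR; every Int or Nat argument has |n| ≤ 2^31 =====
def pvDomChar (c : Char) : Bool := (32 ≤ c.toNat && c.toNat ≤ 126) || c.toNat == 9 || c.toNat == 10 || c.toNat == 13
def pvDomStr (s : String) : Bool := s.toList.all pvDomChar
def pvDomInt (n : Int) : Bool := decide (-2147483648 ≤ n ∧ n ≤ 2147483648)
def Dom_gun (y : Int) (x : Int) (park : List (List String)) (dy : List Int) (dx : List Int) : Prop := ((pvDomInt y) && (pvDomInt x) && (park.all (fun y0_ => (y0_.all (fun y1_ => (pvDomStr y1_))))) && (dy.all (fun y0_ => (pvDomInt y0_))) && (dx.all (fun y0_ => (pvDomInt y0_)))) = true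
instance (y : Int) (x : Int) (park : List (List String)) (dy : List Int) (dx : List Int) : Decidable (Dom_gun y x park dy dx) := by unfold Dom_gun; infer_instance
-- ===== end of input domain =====

-- B replaces A's per-size BFS (deque + visited matrix + early abort) by a round-based
-- set-saturation fixpoint (stopped by a cardinality test) followed by one global
-- neighbour check, recursive prefix-counting over extracted value lists instead of the
-- counting for-else loops, and next() over a descending range instead of the while loop
-- (objective: alternative, not faster). Equality of the two ports is proved on Pre_gun,
-- which carves out exactly the inputs on which the Python A raises.

-- ===== PORT A =====
def pvCell (park : List (List String)) (i j : Int) : String :=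
  (PySem.List.pyGet? ((PySem.List.pyGet? park i).getD []) j).getD ""
def pvGood (park : List (List String)) (c : Int × Int) : Bool := pvCell park c.1 c.2 == "-1"
def pvInSq (y x g : Int) (c : Int × Int) : Bool :=
  decide (y ≤ c.1) && decide (c.1 < y + g) && decide (x ≤ c.2) && decide (c.2 < x + g)

-- cal_dis: counting for-loop with break
def pvRun (p : Int → Bool) : List Int → Int → Int
  | [], acc => acc
  | i :: r, acc => if p i then pvRun p r (acc + 1) else acc

def pvCalDis (y x : Int) (park : List (List String)) : Int × Int :=
  let disY := pvRun (fun i => pvGood park (i, x)) (PySem.List.pyRange (y + 1) (park.length : Int) 1) 1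
  let w : Int := (((PySem.List.pyGet? park 0).getD []).length : Int)
  let disX := pvRun (fun i => pvGood park (y, i)) (PySem.List.pyRange (x + 1) w 1) 1
  (disY, disX)

-- the g x g visited matrix (indices are in range whenever Python's are)
def pvMGet (vis : List (List Bool)) (a b : Nat) : Bool := (vis.getD a []).getD b false
def pvMSet (vis : List (List Bool)) (a b : Nat) : List (List Bool) :=
  vis.set a ((vis.getD a []).set b true)

-- the for-i-in-range(4) body of search (None = the Python 'return False')
def pvDirs (y x g : Int) (park : List (List String)) (dy dx : List Int) (yy xx : Int) :
    List Int → List (Int × Int) → List (List Bool) → Option (List (Int × Int) × List (List Bool))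
  | [], q, vis => some (q, vis)
  | i :: rest, q, vis =>
    let ny := yy + ((PySem.List.pyGet? dy i).getD 0)
    let nx := xx + ((PySem.List.pyGet? dx i).getD 0)
    if pvInSq y x g (ny, nx) && !(pvMGet vis (ny - y).toNat (nx - x).toNat) then
      if pvGood park (ny, nx) then
        pvDirs y x g park dy dx yy xx rest (q ++ [(ny, nx)]) (pvMSet vis (ny - y).toNat (nx - x).toNat)
      else none
    else pvDirs y x g park dy dx yy xx rest q vis

-- the while-q BFS loop; fuel gugu²+1 strictly exceeds the number of iterations
-- (each iteration pops one cell, and a cell is enqueued only when first marked visited)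
def pvBfs (y x g : Int) (park : List (List String)) (dy dx : List Int) :
    Nat → List (Int × Int) → List (List Bool) → Bool
  | 0, _, _ => true
  | _ + 1, [], _ => true
  | f + 1, c :: rest, vis =>
    match pvDirs y x g park dy dx c.1 c.2 (PySem.List.pyRange 0 4 1) rest vis with
    | none => false
    | some (q', vis') => pvBfs y x g park dy dx f q' vis'

def pvSearch (y x gugu : Int) (park : List (List String)) (dy dx : List Int) : Bool :=
  let n := gugu.toNat
  let vis0 := pvMSet (List.replicate n (List.replicate n false)) 0 0
  pvBfs y x gugu park dy dx (n * n + 1) [(y, x)] vis0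

-- while gugu: (gugu starts at min(cal) ≥ 1 and decreases by 1)
def pvGunWhile (y x : Int) (park : List (List String)) (dy dx : List Int) : Nat → Int
  | 0 => 0
  | n + 1 => if pvSearch y x ((n : Int) + 1) park dy dx then (n : Int) + 1 else pvGunWhile y x park dy dx n

def gun (y : Int) (x : Int) (park : List (List String)) (dy : List Int) (dx : List Int) : Int :=
  let cal := pvCalDis y x park
  let gugu := min cal.1 cal.2
  if gugu == 1 then 1 else pvGunWhile y x park dy dx gugu.toNat

-- ===== PORT B =====
-- arm: length of the leading all-'-1' prefix of a value list, recursively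
def bArm : List String → Int
  | [] => 0
  | v :: r => if v == "-1" then 1 + bArm r else 0

-- park[c] == '-1' (a missing index can never compare equal)
def bHas (park : List (List String)) (c : Int × Int) : Bool :=
  match PySem.List.pyGet? park c.1 with
  | none => false
  | some row => PySem.List.pyGet? row c.2 == some "-1"

-- the chained comparison y <= a < y+g and x <= b < x+g
def bIn (y x g : Int) (d : Int × Int) : Bool :=
  decide (y ≤ d.1 ∧ d.1 < y + g ∧ x ≤ d.2 ∧ d.2 < x + g)

def bNbrs (moves : List (Int × Int)) (c : Int × Int) : List (Int × Int) :=
  moves.map (fun m => (c.1 + m.1, c.2 + m.2))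

-- one saturation round: reach | {in-square '-1' neighbours of reach}  (| on an iterable = Set.update)
def bGrow (y x g : Int) (park : List (List String)) (moves : List (Int × Int))
    (S : PySem.Set (Int × Int)) : PySem.Set (Int × Int) :=
  PySem.Set.update S
    (S.flatMap (fun c => (bNbrs moves c).filter (fun d => bIn y x g d && bHas park d)))

-- the while-True loop with its len(grown)==len(reach) stopping test;
-- fuel g²+1 provably reaches the fixpoint Python's loop stops at
def bSat (y x g : Int) (park : List (List String)) (moves : List (Int × Int)) :
    Nat → PySem.Set (Int × Int) → PySem.Set (Int × Int)
  | 0, S => S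
  | n + 1, S =>
    let S' := bGrow y x g park moves S
    if S'.length == S.length then S else bSat y x g park moves n S'

def bClear (y x g : Int) (park : List (List String)) (moves : List (Int × Int)) : Bool :=
  let R := bSat y x g park moves ((g * g).toNat + 1) (PySem.Set.ofList [(y, x)])
  R.all (fun c => (bNbrs moves c).all
    (fun d => !(bIn y x g d) || (d == (y, x) || bHas park d)))

def gun_alt (y : Int) (x : Int) (park : List (List String)) (dy : List Int) (dx : List Int) : Int :=
  let below := (PySem.List.pyRange (y + 1) (park.length : Int) 1).map
      (fun i => (PySem.List.pyGet? ((PySem.List.pyGet? park i).getD []) x).getD "")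
  let right := (PySem.List.pyRange (x + 1) ((((PySem.List.pyGet? park 0).getD []).length : Int)) 1).map
      (fun j => (PySem.List.pyGet? ((PySem.List.pyGet? park y).getD []) j).getD "")
  let best := 1 + min (bArm below) (bArm right)
  if best == 1 then 1
  else
    let moves := (dy.zip dx).take 4
    ((PySem.List.pyRange best 0 (-1)).find? (fun g => bClear y x g park moves)).getD 0

-- ===== PRECONDITION & SPEC =====
-- Pre_gun: exactly the inputs on which A returns normally, up to one narrowing stated
-- here: when either distance loop actually runs, Pre_gun requires park to be rectangular
-- and the index bounds below (on ragged parks whether A raises an IndexError or returns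
-- is an accident of its early breaks and of the BFS traversal order); when both loops
-- are empty (y+1 >= len(park) and x+1 >= len(park[0])) A touches no cell and returns 1,
-- and Pre_gun admits any park shape.
def Pre_gun (y : Int) (x : Int) (park : List (List String)) (dy : List Int) (dx : List Int) : Prop :=
  0 < park.length ∧
  (((park.length : Int) ≤ y + 1 ∧ ((((PySem.List.pyGet? park 0).getD []).length : Int)) ≤ x + 1) ∨
   (0 < ((PySem.List.pyGet? park 0).getD []).length ∧
    (∀ row ∈ park, row.length = ((PySem.List.pyGet? park 0).getD []).length) ∧
    ((park.length : Int) ≤ y + 1 ∨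
      (-(park.length : Int) ≤ y + 1 ∧ -((((PySem.List.pyGet? park 0).getD []).length : Int)) ≤ x ∧
        x < (((PySem.List.pyGet? park 0).getD []).length : Int))) ∧
    (((((PySem.List.pyGet? park 0).getD []).length : Int)) ≤ x + 1 ∨
      (-((((PySem.List.pyGet? park 0).getD []).length : Int)) ≤ x + 1 ∧
        -(park.length : Int) ≤ y ∧ y < (park.length : Int))) ∧
    (((park.length : Int) ≤ y + 1 ∨ (PySem.List.pyGet? ((PySem.List.pyGet? park (y + 1)).getD []) x).getD "" ≠ "-1") ∨
     ((((PySem.List.pyGet? park 0).getD []).length : Int) ≤ x + 1 ∨ (PySem.List.pyGet? ((PySem.List.pyGet? park y).getD []) (x + 1)).getD "" ≠ "-1") ∨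
     (-(park.length : Int) ≤ y ∧ y < (park.length : Int) ∧
      -((((PySem.List.pyGet? park 0).getD []).length : Int)) ≤ x ∧
      x < (((PySem.List.pyGet? park 0).getD []).length : Int) ∧
      4 ≤ dy.length ∧ 4 ≤ dx.length))))
instance (y : Int) (x : Int) (park : List (List String)) (dy : List Int) (dx : List Int) : Decidable (Pre_gun y x park dy dx) := by unfold Pre_gun; infer_instance

def pvWitness_gun : Int × Int × List (List String) × List Int × List Int :=
  (0, 0, [["S", "-1"], ["-1", "-1"]], [-1, 1, 0, 0], [0, 0, -1, 1])

def Spec_gun (y : Int) (x : Int) (park : List (List String)) (dy : List Int) (dx : List Int) (out : Int) : Prop := out = gun_alt y x park dy dx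
instance (y : Int) (x : Int) (park : List (List String)) (dy : List Int) (dx : List Int) (out : Int) : Decidable (Spec_gun y x park dy dx out) := by unfold Spec_gun; infer_instance

-- ===== CLAIM (what is proved, stated in full; the proofs are below) =====
def Claim_equal_gun : Prop := ∀ (y : Int) (x : Int) (park : List (List String)) (dy : List Int) (dx : List Int), Dom_gun y x park dy dx → Pre_gun y x park dy dx → Spec_gun y x park dy dx (gun y x park dy dx)

-- ===== LEMMAS AND PROOFS =====

-- bridges between the two ports' primitive tests
lemma bIn_eq (y x g : Int) (d : Int × Int) : bIn y x g d = pvInSq y x g d := by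
  by_cases h1 : y ≤ d.1 <;> by_cases h2 : d.1 < y + g <;>
    by_cases h3 : x ≤ d.2 <;> by_cases h4 : d.2 < x + g <;>
      simp [bIn, pvInSq, h1, h2, h3, h4]

lemma bHas_eq (park : List (List String)) (c : Int × Int) : bHas park c = pvGood park c := by
  unfold bHas pvGood pvCell
  cases h : PySem.List.pyGet? park c.1 with
  | none => simp [PySem.List.pyGet?]
  | some row =>
    cases h2 : PySem.List.pyGet? row c.2 with
    | none => simp [h2]
    | some v => simp [h2]

-- the 4-element move list both while-loops effectively traverse
def mv4 (dy dx : List Int) : List (Int × Int) :=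
  (PySem.List.pyRange 0 4 1).map (fun k => ((PySem.List.pyGet? dy k).getD 0, (PySem.List.pyGet? dx k).getD 0))

-- the set of cells both programs talk about, and the common reachability spec
inductive pvReach (park : List (List String)) (moves : List (Int × Int)) (y x g : Int) : Int × Int → Prop
  | base : pvReach park moves y x g (y, x)
  | step {c d : Int × Int} : pvReach park moves y x g c → d ∈ bNbrs moves c →
      pvInSq y x g d = true → pvGood park d = true → pvReach park moves y x g d

def pvOk (park : List (List String)) (moves : List (Int × Int)) (y x g : Int) : Prop :=
  ∀ c, pvReach park moves y x g c → ∀ d ∈ bNbrs moves c, pvInSq y x g d = true →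
    d = (y, x) ∨ pvGood park d = true

-- ---------- matrix lemmas (A side) ----------
def pvVis (y x : Int) (vis : List (List Bool)) (c : Int × Int) : Prop :=
  y ≤ c.1 ∧ x ≤ c.2 ∧ pvMGet vis (c.1 - y).toNat (c.2 - x).toNat = true
def pvDims (n : Nat) (vis : List (List Bool)) : Prop :=
  vis.length = n ∧ ∀ r ∈ vis, r.length = n
def pvUnvis (vis : List (List Bool)) : Nat := (vis.map (fun r => r.count false)).sum

lemma pvGetD_set_self {α : Type} (l : List α) (n : Nat) (v d : α) (h : n < l.length) :
    (l.set n v).getD n d = v := by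
  rw [List.getD_eq_getElem?_getD, List.getElem?_set_self h]; rfl

lemma pvGetD_set_ne {α : Type} (l : List α) (n m : Nat) (v d : α) (h : n ≠ m) :
    (l.set n v).getD m d = l.getD m d := by
  rw [List.getD_eq_getElem?_getD, List.getElem?_set_ne h, ← List.getD_eq_getElem?_getD]

lemma pvDims_mset (n : Nat) (vis : List (List Bool)) (a b : Nat) (h : pvDims n vis) :
    pvDims n (pvMSet vis a b) := by
  unfold pvMSet pvDims
  refine ⟨by simpa using h.1, ?_⟩
  intro r hr
  by_cases ha : vis.length ≤ a
  · rw [List.set_eq_of_length_le ha] at hr; exact h.2 r hr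
  · push Not at ha
    rcases List.mem_or_eq_of_mem_set hr with h' | rfl
    · exact h.2 r h'
    · rw [List.length_set]
      exact h.2 _ (by
        rw [List.getD_eq_getElem?_getD, List.getElem?_eq_getElem ha]
        exact List.getElem_mem ha)

lemma pvMGet_mset_self (vis : List (List Bool)) (a b : Nat)
    (ha : a < vis.length) (hb : b < (vis.getD a []).length) :
    pvMGet (pvMSet vis a b) a b = true := by
  unfold pvMGet pvMSet
  rw [pvGetD_set_self _ _ _ _ ha, pvGetD_set_self _ _ _ _ hb]

lemma pvMGet_mset_mono (vis : List (List Bool)) (a b p q : Nat)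
    (h : pvMGet vis p q = true) : pvMGet (pvMSet vis a b) p q = true := by
  unfold pvMGet pvMSet at *
  by_cases hpa : p = a
  · subst hpa
    by_cases hp : p < vis.length
    · rw [pvGetD_set_self _ _ _ _ hp]
      by_cases hqb : q = b
      · subst hqb
        by_cases hq : q < (vis.getD p []).length
        · rw [pvGetD_set_self _ _ _ _ hq]
        · rw [List.set_eq_of_length_le (by omega)]; exact h
      · rw [pvGetD_set_ne _ _ _ _ _ (fun hh => hqb hh.symm)]; exact h
    · rw [List.set_eq_of_length_le (by omega)]; exact h
  · rw [pvGetD_set_ne _ _ _ _ _ (fun hh => hpa hh.symm)]; exact h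

lemma pvMGet_mset_rev (vis : List (List Bool)) (a b p q : Nat)
    (h : pvMGet (pvMSet vis a b) p q = true) :
    pvMGet vis p q = true ∨ (p = a ∧ q = b) := by
  by_cases hpa : p = a
  · by_cases hqb : q = b
    · exact Or.inr ⟨hpa, hqb⟩
    · subst hpa
      left
      unfold pvMGet pvMSet at *
      by_cases hp : p < vis.length
      · rw [pvGetD_set_self _ _ _ _ hp] at h
        rw [pvGetD_set_ne _ _ _ _ _ (fun hh => hqb hh.symm)] at h
        exact h
      · rw [List.set_eq_of_length_le (by omega)] at h; exact h
  · left
    unfold pvMGet pvMSet at *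
    rw [pvGetD_set_ne _ _ _ _ _ (fun hh => hpa hh.symm)] at h
    exact h

lemma pvCount_false_set_true (r : List Bool) (b : Nat) (hb : b < r.length)
    (hf : r.getD b false = false) : (r.set b true).count false + 1 = r.count false := by
  induction r generalizing b with
  | nil => simp at hb
  | cons hd tl ih =>
    cases b with
    | zero =>
      simp only [List.getD_eq_getElem?_getD, List.getElem?_cons_zero, Option.getD_some] at hf
      subst hf
      simp [List.count_cons]
    | succ b =>
      simp only [List.length_cons, Nat.succ_lt_succ_iff] at hb
      simp only [List.getD_eq_getElem?_getD, List.getElem?_cons_succ] at hf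
      have := ih b hb (by rw [List.getD_eq_getElem?_getD]; exact hf)
      simp only [List.set_cons_succ, List.count_cons]
      omega

lemma pvUnvis_mset (vis : List (List Bool)) (a b : Nat)
    (ha : a < vis.length) (hb : b < (vis.getD a []).length)
    (hf : pvMGet vis a b = false) : pvUnvis (pvMSet vis a b) + 1 = pvUnvis vis := by
  unfold pvUnvis pvMSet pvMGet at *
  induction vis generalizing a with
  | nil => simp at ha
  | cons hd tl ih =>
    cases a with
    | zero =>
      simp only [List.getD_eq_getElem?_getD, List.getElem?_cons_zero, Option.getD_some] at hb hf ⊢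
      simp only [List.set_cons_zero, List.map_cons, List.sum_cons]
      have := pvCount_false_set_true hd b hb (by rw [List.getD_eq_getElem?_getD]; exact hf)
      omega
    | succ a =>
      simp only [List.length_cons, Nat.succ_lt_succ_iff] at ha
      simp only [List.getD_eq_getElem?_getD, List.getElem?_cons_succ] at hb hf
      simp only [List.getD_cons_succ]
      have := ih a ha (by rw [List.getD_eq_getElem?_getD]; exact hb)
        (by rw [List.getD_eq_getElem?_getD]; exact hf)
      simp only [List.set_cons_succ, List.map_cons, List.sum_cons] at this ⊢
      omega

lemma pvMGet_replicate (n a b : Nat) :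
    pvMGet (List.replicate n (List.replicate n false)) a b = false := by
  unfold pvMGet
  simp only [List.getD_eq_getElem?_getD, List.getElem?_replicate]
  split_ifs <;> simp [List.getElem?_replicate] <;> split_ifs <;> simp

lemma pvUnvis_replicate (n : Nat) :
    pvUnvis (List.replicate n (List.replicate n false)) = n * n := by
  unfold pvUnvis
  simp [List.map_replicate, List.sum_replicate, List.count_replicate, smul_eq_mul]

-- V is monotone under marking, and new V cells are old or the marked position
lemma pvVis_mset_mono (y x : Int) (vis : List (List Bool)) (a b : Nat) (c : Int × Int)
    (h : pvVis y x vis c) : pvVis y x (pvMSet vis a b) c := by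
  exact ⟨h.1, h.2.1, pvMGet_mset_mono vis a b _ _ h.2.2⟩

-- ---------- the BFS characterisation ----------
lemma pvDirs_facts (y x g : Int) (park : List (List String)) (dy dx : List Int) (yy xx : Int)
    (L : List Int) (q : List (Int × Int)) (vis : List (List Bool))
    (hd : pvDims g.toNat vis) :
    (pvDirs y x g park dy dx yy xx L q vis = none →
      ∃ i ∈ L, pvInSq y x g (yy + ((PySem.List.pyGet? dy i).getD 0), xx + ((PySem.List.pyGet? dx i).getD 0)) = true ∧
        pvGood park (yy + ((PySem.List.pyGet? dy i).getD 0), xx + ((PySem.List.pyGet? dx i).getD 0)) = false ∧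
        pvMGet vis ((yy + ((PySem.List.pyGet? dy i).getD 0)) - y).toNat ((xx + ((PySem.List.pyGet? dx i).getD 0)) - x).toNat = false) ∧
    (∀ q' vis', pvDirs y x g park dy dx yy xx L q vis = some (q', vis') →
      pvDims g.toNat vis' ∧
      (∀ c, pvVis y x vis c → pvVis y x vis' c) ∧
      ∃ ext, q' = q ++ ext ∧
        (∀ c ∈ ext, (∃ i ∈ L, c = (yy + ((PySem.List.pyGet? dy i).getD 0), xx + ((PySem.List.pyGet? dx i).getD 0))) ∧
          pvInSq y x g c = true ∧ pvGood park c = true ∧ pvVis y x vis' c) ∧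
        (∀ c, pvVis y x vis' c → pvVis y x vis c ∨ c ∈ ext) ∧
        (∀ i ∈ L, pvInSq y x g (yy + ((PySem.List.pyGet? dy i).getD 0), xx + ((PySem.List.pyGet? dx i).getD 0)) = true →
          pvVis y x vis' (yy + ((PySem.List.pyGet? dy i).getD 0), xx + ((PySem.List.pyGet? dx i).getD 0))) ∧
        q'.length + pvUnvis vis' ≤ q.length + pvUnvis vis) := by
  induction L generalizing q vis with
  | nil =>
    constructor
    · intro hnone; simp [pvDirs] at hnone
    · intro q' vis' hsome
      simp only [pvDirs, Option.some.injEq, Prod.mk.injEq] at hsome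
      obtain ⟨rfl, rfl⟩ := hsome
      exact ⟨hd, fun c h => h, [], by simp, by simp, fun c h => Or.inl h, by simp, le_rfl⟩
  | cons i rest ih =>
    have hrange : ∀ (c : Int × Int), pvInSq y x g c = true →
        (c.1 - y).toNat < g.toNat ∧ (c.2 - x).toNat < g.toNat ∧ y ≤ c.1 ∧ x ≤ c.2 := by
      intro c hc
      simp only [pvInSq, Bool.and_eq_true, decide_eq_true_eq] at hc
      omega
    set ny := yy + ((PySem.List.pyGet? dy i).getD 0) with hny
    set nx := xx + ((PySem.List.pyGet? dx i).getD 0) with hnx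
    have hstep : pvDirs y x g park dy dx yy xx (i :: rest) q vis =
        (if pvInSq y x g (ny, nx) && !(pvMGet vis (ny - y).toNat (nx - x).toNat) then
          (if pvGood park (ny, nx) then
            pvDirs y x g park dy dx yy xx rest (q ++ [(ny, nx)]) (pvMSet vis (ny - y).toNat (nx - x).toNat)
          else none)
        else pvDirs y x g park dy dx yy xx rest q vis) := rfl
    by_cases hg1 : (pvInSq y x g (ny, nx) && !(pvMGet vis (ny - y).toNat (nx - x).toNat)) = true
    · have hin : pvInSq y x g (ny, nx) = true := by
        simp only [Bool.and_eq_true] at hg1; exact hg1.1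
      have hmf : pvMGet vis (ny - y).toNat (nx - x).toNat = false := by
        simp only [Bool.and_eq_true, Bool.not_eq_true'] at hg1; exact hg1.2
      rw [hstep, if_pos hg1]
      by_cases hg2 : pvGood park (ny, nx) = true
      · rw [if_pos hg2]
        have hA : (ny - y).toNat < vis.length := by rw [hd.1]; exact (hrange _ hin).1
        have hB : (nx - x).toNat < (vis.getD (ny - y).toNat []).length := by
          rw [hd.2 _ (by
            rw [List.getD_eq_getElem?_getD, List.getElem?_eq_getElem hA]
            exact List.getElem_mem hA)]
          exact (hrange _ hin).2.1
        have hd2 : pvDims g.toNat (pvMSet vis (ny - y).toNat (nx - x).toNat) :=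
          pvDims_mset _ _ _ _ hd
        have ihx := ih (q ++ [(ny, nx)]) (pvMSet vis (ny - y).toNat (nx - x).toNat) hd2
        constructor
        · intro hnone
          obtain ⟨i', hi', hin', hgood', hmf'⟩ := ihx.1 hnone
          refine ⟨i', List.mem_cons_of_mem _ hi', hin', hgood', ?_⟩
          by_contra hcon
          have hvt : pvMGet vis ((yy + ((PySem.List.pyGet? dy i').getD 0)) - y).toNat
              ((xx + ((PySem.List.pyGet? dx i').getD 0)) - x).toNat = true := by
            cases hv : pvMGet vis ((yy + ((PySem.List.pyGet? dy i').getD 0)) - y).toNat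
                ((xx + ((PySem.List.pyGet? dx i').getD 0)) - x).toNat
            · exact absurd hv hcon
            · rfl
          exact absurd (pvMGet_mset_mono vis (ny - y).toNat (nx - x).toNat _ _ hvt)
            (by rw [hmf']; simp)
        · intro q' vis' hsome
          obtain ⟨hdv', hmono', ext', hq', hext', hrev', hhead', hacc'⟩ := ihx.2 q' vis' hsome
          have hvisnb : pvVis y x (pvMSet vis (ny - y).toNat (nx - x).toNat) (ny, nx) := by
            refine ⟨(hrange _ hin).2.2.1, (hrange _ hin).2.2.2, ?_⟩
            exact pvMGet_mset_self vis _ _ hA hB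
          refine ⟨hdv', fun c h => hmono' c (pvVis_mset_mono y x vis _ _ c h), (ny, nx) :: ext',
            by rw [hq', List.append_cons, List.append_assoc]; simp, ?_, ?_, ?_, ?_⟩
          · intro c hc
            rcases List.mem_cons.mp hc with rfl | hc'
            · exact ⟨⟨i, List.mem_cons_self, rfl⟩, hin, hg2, hmono' _ hvisnb⟩
            · obtain ⟨⟨i', hi', hceq⟩, h1, h2, h3⟩ := hext' c hc'
              exact ⟨⟨i', List.mem_cons_of_mem _ hi', hceq⟩, h1, h2, h3⟩
          · intro c hc
            rcases hrev' c hc with hc2 | hc2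
            · -- pvVis on the marked matrix: old or the marked cell
              obtain ⟨hcy, hcx, hcm⟩ := hc2
              rcases pvMGet_mset_rev vis _ _ _ _ hcm with hold | ⟨hpa, hqb⟩
              · exact Or.inl ⟨hcy, hcx, hold⟩
              · right
                have h1 : c.1 = ny := by
                  have := (hrange _ hin).2.2.1
                  omega
                have h2 : c.2 = nx := by
                  have := (hrange _ hin).2.2.2
                  omega
                simp [List.mem_cons]
                left
                exact Prod.ext h1 h2
            · exact Or.inr (List.mem_cons_of_mem _ hc2)
          · intro i' hi' hin'
            rcases List.mem_cons.mp hi' with rfl | hi''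
            · exact hmono' _ hvisnb
            · exact hhead' i' hi'' hin'
          · have hu := pvUnvis_mset vis _ _ hA hB hmf
            simp only [List.length_append, List.length_cons, List.length_nil] at hacc' ⊢
            omega
      · rw [if_neg hg2]
        constructor
        · intro _
          exact ⟨i, List.mem_cons_self, hin, by simpa using hg2, hmf⟩
        · intro q' vis' hsome; cases hsome
    · rw [hstep, if_neg hg1]
      constructor
      · intro hnone
        obtain ⟨i', hi', h1, h2, h3⟩ := (ih q vis hd).1 hnone
        exact ⟨i', List.mem_cons_of_mem _ hi', h1, h2, h3⟩
      · intro q' vis' hsome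
        obtain ⟨hdv', hmono', ext', hq', hext', hrev', hhead', hacc'⟩ := (ih q vis hd).2 q' vis' hsome
        refine ⟨hdv', hmono', ext', hq', ?_, hrev', ?_, hacc'⟩
        · intro c hc
          obtain ⟨⟨i', hi', hceq⟩, h1, h2, h3⟩ := hext' c hc
          exact ⟨⟨i', List.mem_cons_of_mem _ hi', hceq⟩, h1, h2, h3⟩
        · intro i' hi' hin'
          rcases List.mem_cons.mp hi' with rfl | hi''
          · -- guard failed but in-square: the cell was already visited
            have hmt : pvMGet vis (ny - y).toNat (nx - x).toNat = true := by
              by_contra hcon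
              have : pvMGet vis (ny - y).toNat (nx - x).toNat = false := by
                cases hv : pvMGet vis (ny - y).toNat (nx - x).toNat
                · rfl
                · exact absurd hv hcon
              rw [hin', this] at hg1
              simp at hg1
            exact hmono' _ ⟨(hrange _ hin').2.2.1, (hrange _ hin').2.2.2, hmt⟩
          · exact hhead' i' hi'' hin'

lemma bNbrs_mv4 (dy dx : List Int) (c : Int × Int) :
    bNbrs (mv4 dy dx) c = (PySem.List.pyRange 0 4 1).map
      (fun i => (c.1 + ((PySem.List.pyGet? dy i).getD 0), c.2 + ((PySem.List.pyGet? dx i).getD 0))) := by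
  simp [bNbrs, mv4, List.map_map]

lemma pvBfs_char (y x g : Int) (park : List (List String)) (dy dx : List Int) :
    ∀ (f : Nat) (q : List (Int × Int)) (vis : List (List Bool)),
    pvDims g.toNat vis →
    q.length + pvUnvis vis < f →
    pvVis y x vis (y, x) →
    (∀ c ∈ q, pvVis y x vis c) →
    (∀ c, pvVis y x vis c → pvReach park (mv4 dy dx) y x g c) →
    (∀ c, pvVis y x vis c → c = (y, x) ∨ pvGood park c = true) →
    (∀ c, pvVis y x vis c → c ∉ q → ∀ d ∈ bNbrs (mv4 dy dx) c, pvInSq y x g d = true → pvVis y x vis d) →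
    (pvBfs y x g park dy dx f q vis = true ↔ pvOk park (mv4 dy dx) y x g) := by
  intro f
  induction f with
  | zero => intro q vis _ hfuel _ _ _ _ _; omega
  | succ f ihf =>
    intro q vis hd hfuel hstart hq hv hgood hcl
    match q with
    | [] =>
      rw [show pvBfs y x g park dy dx (f + 1) [] vis = true from rfl]
      refine iff_of_true rfl ?_
      have hall : ∀ c, pvReach park (mv4 dy dx) y x g c → pvVis y x vis c := by
        intro c hr
        induction hr with
        | base => exact hstart
        | step h1 h2 h3 h4 ihr => exact hcl _ ihr (by simp) _ h2 h3
      intro c hr d hdm hin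
      exact hgood d (hcl c (hall c hr) (by simp) d hdm hin)
    | c :: rest =>
      have hdf := pvDirs_facts y x g park dy dx c.1 c.2 (PySem.List.pyRange 0 4 1) rest vis hd
      cases hres : pvDirs y x g park dy dx c.1 c.2 (PySem.List.pyRange 0 4 1) rest vis with
      | none =>
        have hfalse : pvBfs y x g park dy dx (f + 1) (c :: rest) vis = false := by
          show (match pvDirs y x g park dy dx c.1 c.2 (PySem.List.pyRange 0 4 1) rest vis with
            | none => false
            | some (q', vis') => pvBfs y x g park dy dx f q' vis') = false
          rw [hres]
        rw [hfalse]
        refine iff_of_false (by simp) ?_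
        intro hok
        obtain ⟨i, hiL, hin, hgf, hmf⟩ := hdf.1 hres
        have hdmem : (c.1 + ((PySem.List.pyGet? dy i).getD 0), c.2 + ((PySem.List.pyGet? dx i).getD 0)) ∈
            bNbrs (mv4 dy dx) c := by
          rw [bNbrs_mv4]; exact List.mem_map.mpr ⟨i, hiL, rfl⟩
        have hreach := hv c (hq c (by simp))
        rcases hok c hreach _ hdmem hin with hds | hgt
        · obtain ⟨e1, e2⟩ := Prod.mk.injEq .. |>.mp hds
          rw [e1, e2] at hmf
          have hs := hstart.2.2
          simp only [sub_self, Int.toNat_zero] at hmf hs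
          rw [hs] at hmf; cases hmf
        · rw [hgt] at hgf; cases hgf
      | some res =>
        obtain ⟨q', vis'⟩ := res
        have hstep2 : pvBfs y x g park dy dx (f + 1) (c :: rest) vis = pvBfs y x g park dy dx f q' vis' := by
          show (match pvDirs y x g park dy dx c.1 c.2 (PySem.List.pyRange 0 4 1) rest vis with
            | none => false
            | some (q', vis') => pvBfs y x g park dy dx f q' vis') = pvBfs y x g park dy dx f q' vis'
          rw [hres]
        rw [hstep2]
        obtain ⟨hdv', hmono', ext, hq', hext, hrev, hhead, hacc⟩ := hdf.2 q' vis' hres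
        refine ihf q' vis' hdv' ?_ (hmono' _ hstart) ?_ ?_ ?_ ?_
        · simp only [List.length_cons] at hfuel
          omega
        · intro e he
          rw [hq'] at he
          rcases List.mem_append.mp he with he' | he'
          · exact hmono' e (hq e (List.mem_cons_of_mem _ he'))
          · exact (hext e he').2.2.2
        · intro e he
          rcases hrev e he with hold | hextm
          · exact hv e hold
          · obtain ⟨⟨i, hi, rfl⟩, hin, hgd, _⟩ := hext e hextm
            refine pvReach.step (hv c (hq c (by simp))) ?_ hin hgd
            rw [bNbrs_mv4]; exact List.mem_map.mpr ⟨i, hi, rfl⟩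
        · intro e he
          rcases hrev e he with hold | hextm
          · exact hgood e hold
          · exact Or.inr (hext e hextm).2.2.1
        · intro e he hne d hdm hin'
          rcases hrev e he with hold | hextm
          · by_cases heq : e ∈ (c :: rest)
            · rcases List.mem_cons.mp heq with rfl | he''
              · obtain ⟨i, hi, rfl⟩ := by
                  rw [bNbrs_mv4] at hdm; exact List.mem_map.mp hdm
                exact hhead i hi hin'
              · exact absurd (by rw [hq']; exact List.mem_append.mpr (Or.inl he'')) hne
            · exact hmono' d (hcl e hold heq d hdm hin')
          · exact absurd (by rw [hq']; exact List.mem_append.mpr (Or.inr hextm)) hne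

lemma pvSearch_char (y x g : Int) (park : List (List String)) (dy dx : List Int) (hg : 1 ≤ g) :
    (pvSearch y x g park dy dx = true ↔ pvOk park (mv4 dy dx) y x g) := by
  unfold pvSearch
  have hn1 : 1 ≤ g.toNat := by omega
  have hrep : pvDims g.toNat (List.replicate g.toNat (List.replicate g.toNat false)) :=
    ⟨by simp, fun r hr => by rw [List.eq_of_mem_replicate hr]; simp⟩
  have hA : 0 < (List.replicate g.toNat (List.replicate g.toNat false) : List (List Bool)).length := by
    simp only [List.length_replicate]; omega
  have hB : 0 < ((List.replicate g.toNat (List.replicate g.toNat false) : List (List Bool)).getD 0 []).length := by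
    rw [List.getD_eq_getElem?_getD, List.getElem?_replicate, if_pos (by omega : 0 < g.toNat)]
    simp only [Option.getD_some, List.length_replicate]; omega
  have hstart : pvVis y x (pvMSet (List.replicate g.toNat (List.replicate g.toNat false)) 0 0) (y, x) := by
    refine ⟨le_refl y, le_refl x, ?_⟩
    simpa [sub_self] using pvMGet_mset_self _ 0 0 hA hB
  have hv0 : ∀ c, pvVis y x (pvMSet (List.replicate g.toNat (List.replicate g.toNat false)) 0 0) c → c = (y, x) := by
    intro c hc
    obtain ⟨hcy, hcx, hm⟩ := hc
    rcases pvMGet_mset_rev _ 0 0 _ _ hm with hold | ⟨h1, h2⟩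
    · rw [pvMGet_replicate] at hold; cases hold
    · have e1 : c.1 = y := by omega
      have e2 : c.2 = x := by omega
      exact Prod.ext e1 e2
  refine pvBfs_char y x g park dy dx _ _ _ (pvDims_mset _ _ _ _ hrep) ?_ hstart ?_ ?_ ?_ ?_
  · have hu := pvUnvis_mset _ 0 0 hA hB (pvMGet_replicate g.toNat 0 0)
    rw [pvUnvis_replicate] at hu
    simp only [List.length_cons, List.length_nil]
    omega
  · intro c hc
    rcases List.mem_cons.mp hc with rfl | h
    · exact hstart
    · cases h
  · intro c hc
    rw [hv0 c hc]
    exact pvReach.base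
  · intro c hc
    exact Or.inl (hv0 c hc)
  · intro c hc hnq
    exact absurd (by rw [hv0 c hc]; exact List.mem_cons_self) hnq

-- ---------- the saturation characterisation (B side) ----------
def pvNB (y x g : Int) : List (Int × Int) :=
  (y, x) :: (PySem.List.pyRange y (y + g) 1).flatMap
    (fun a => (PySem.List.pyRange x (x + g) 1).map (fun b => (a, b)))

lemma pvNB_length (y x g : Int) : (pvNB y x g).length = g.toNat * g.toNat + 1 := by
  simp only [pvNB, List.length_cons, List.length_flatMap, List.map_map]
  have : ∀ a : Int, ((PySem.List.pyRange x (x + g) 1).map (fun b => (a, b))).length = g.toNat := by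
    intro a
    simp [PySem.List.length_pyRange_one]
  have h2 : (List.map (fun a => ((PySem.List.pyRange x (x + g) 1).map (fun b => (a, b))).length)
        (PySem.List.pyRange y (y + g) 1)) = List.map (fun _ => g.toNat) (PySem.List.pyRange y (y + g) 1) :=
    List.map_congr_left (fun a _ => this a)
  rw [h2, List.map_const', List.sum_replicate, smul_eq_mul, PySem.List.length_pyRange_one]
  simp [mul_comm]

lemma mem_pvNB (y x g : Int) (c : Int × Int)
    (h : c = (y, x) ∨ pvInSq y x g c = true) : c ∈ pvNB y x g := by
  rcases h with rfl | hin
  · exact List.mem_cons_self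
  · simp only [pvInSq, Bool.and_eq_true, decide_eq_true_eq] at hin
    obtain ⟨⟨⟨h1, h2⟩, h3⟩, h4⟩ := hin
    refine List.mem_cons_of_mem _ (List.mem_flatMap.mpr ⟨c.1, ?_, ?_⟩)
    · exact (PySem.List.mem_pyRange_one).mpr ⟨h1, h2⟩
    · exact List.mem_map.mpr ⟨c.2, (PySem.List.mem_pyRange_one).mpr ⟨h3, h4⟩, rfl⟩

lemma bSat_facts (y x g : Int) (park : List (List String)) (moves : List (Int × Int)) :
    ∀ (m : Nat) (S : PySem.Set (Int × Int)),
    S.Nodup → (∀ c ∈ S, c ∈ pvNB y x g) → (∀ c ∈ S, pvReach park moves y x g c) → (y, x) ∈ S →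
    g.toNat * g.toNat + 1 < m + S.length →
    (∀ c ∈ bSat y x g park moves m S, pvReach park moves y x g c) ∧
    (y, x) ∈ bSat y x g park moves m S ∧
    bGrow y x g park moves (bSat y x g park moves m S) = bSat y x g park moves m S := by
  intro m
  induction m with
  | zero =>
    intro S hnd hNB hR hs hfuel
    have hsub : S ⊆ pvNB y x g := fun c hc => hNB c hc
    have := (hnd.subperm hsub).length_le
    rw [pvNB_length] at this
    omega
  | succ m ih =>
    intro S hnd hNB hR hs hfuel
    have hstep : bSat y x g park moves (m + 1) S =
        (if (bGrow y x g park moves S).length == S.length then S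
         else bSat y x g park moves m (bGrow y x g park moves S)) := rfl
    have happ := PySem.Set.update_eq_append_filter S
      (S.flatMap (fun c => (bNbrs moves c).filter (fun d => bIn y x g d && bHas park d)))
    by_cases heq : ((bGrow y x g park moves S).length == S.length) = true
    · rw [hstep, if_pos heq]
      refine ⟨hR, hs, ?_⟩
      -- equal cardinalities: the appended filtered block is empty, so grow S = S
      have hlen : (bGrow y x g park moves S).length = S.length := by simpa using heq
      have hext : (PySem.Set.ofList (S.flatMap (fun c => (bNbrs moves c).filter
          (fun d => bIn y x g d && bHas park d)))).filter (fun z => !(PySem.Set.contains S z)) = [] := by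
        have hlen2 := hlen
        rw [bGrow, happ, List.length_append] at hlen2
        exact List.eq_nil_of_length_eq_zero (by omega)
      rw [bGrow, happ, hext, List.append_nil]
    · rw [hstep, if_neg heq]
      have hmemS' : ∀ c ∈ bGrow y x g park moves S,
          c ∈ S ∨ ∃ e ∈ S, c ∈ bNbrs moves e ∧ pvInSq y x g c = true ∧ pvGood park c = true := by
        intro c hc
        rcases (PySem.Set.mem_update _ _ _).mp hc with hcS | hcf
        · exact Or.inl hcS
        · obtain ⟨e, he, hcf2⟩ := List.mem_flatMap.mp hcf
          have := List.mem_filter.mp hcf2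
          simp only [Bool.and_eq_true, bIn_eq, bHas_eq] at this
          exact Or.inr ⟨e, he, this.1, this.2.1, this.2.2⟩
      have hlen : S.length + 1 ≤ (bGrow y x g park moves S).length := by
        have hne : (PySem.Set.ofList (S.flatMap (fun c => (bNbrs moves c).filter
            (fun d => bIn y x g d && bHas park d)))).filter (fun z => !(PySem.Set.contains S z)) ≠ [] := by
          intro hnil
          apply heq
          have : bGrow y x g park moves S = S := by
            rw [bGrow, happ, hnil, List.append_nil]
          rw [this]
          simp
        rw [bGrow, happ, List.length_append]
        have := List.length_pos_iff.mpr hne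
        omega
      refine ih (bGrow y x g park moves S) (PySem.Set.nodup_update _ _ hnd) ?_ ?_ ?_ ?_
      · intro c hc
        rcases hmemS' c hc with hcS | ⟨e, he, hmem, hin, hgd⟩
        · exact hNB c hcS
        · exact mem_pvNB y x g c (Or.inr hin)
      · intro c hc
        rcases hmemS' c hc with hcS | ⟨e, he, hmem, hin, hgd⟩
        · exact hR c hcS
        · exact pvReach.step (hR e he) hmem hin hgd
      · exact (PySem.Set.mem_update _ _ _).mpr (Or.inl hs)
      · omega

lemma bClear_char (y x g : Int) (park : List (List String)) (moves : List (Int × Int)) :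
    (bClear y x g park moves = true ↔ pvOk park moves y x g) := by
  have hmul : g.toNat * g.toNat ≤ (g * g).toNat := by
    by_cases hg0 : 0 ≤ g
    · have he : g * g = ((g.toNat * g.toNat : Nat) : Int) := by
        push_cast
        rw [Int.toNat_of_nonneg hg0]
      rw [he, Int.toNat_natCast]
    · simp [Int.toNat_of_nonpos (by omega : g ≤ 0)]
  have hs0 : (y, x) ∈ PySem.Set.ofList [(y, x)] := (PySem.Set.mem_ofList _ _).mpr (by simp)
  have hlen0 : 0 < (PySem.Set.ofList [(y, x)] : List (Int × Int)).length := List.length_pos_of_mem hs0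
  obtain ⟨hsound, hstart, hfix⟩ := bSat_facts y x g park moves ((g * g).toNat + 1)
    (PySem.Set.ofList [(y, x)]) (PySem.Set.nodup_ofList _)
    (fun c hc => by
      have hc' := (PySem.Set.mem_ofList _ _).mp hc
      simp only [List.mem_singleton] at hc'
      exact mem_pvNB y x g c (Or.inl hc'))
    (fun c hc => by
      have hc' := (PySem.Set.mem_ofList _ _).mp hc
      simp only [List.mem_singleton] at hc'
      rw [hc']
      exact pvReach.base)
    hs0 (by omega)
  have hcomp : ∀ c, pvReach park moves y x g c →
      c ∈ bSat y x g park moves ((g * g).toNat + 1) (PySem.Set.ofList [(y, x)]) := by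
    intro c hr
    induction hr with
    | base => exact hstart
    | step h1 h2 h3 h4 ihr =>
      rename_i c' d'
      have hmem : d' ∈ bGrow y x g park moves
          (bSat y x g park moves ((g * g).toNat + 1) (PySem.Set.ofList [(y, x)])) :=
        (PySem.Set.mem_update _ _ _).mpr (Or.inr (List.mem_flatMap.mpr
          ⟨c', ihr, List.mem_filter.mpr ⟨h2, by rw [bIn_eq, bHas_eq, h3, h4]; rfl⟩⟩))
      rwa [hfix] at hmem
  show (bSat y x g park moves ((g * g).toNat + 1) (PySem.Set.ofList [(y, x)])).all
      (fun c => (bNbrs moves c).all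
        (fun d => !(bIn y x g d) || (d == (y, x) || bHas park d))) = true ↔ pvOk park moves y x g
  constructor
  · intro hall c hr d hdm hin
    have h1 := List.all_eq_true.mp hall _ (hcomp c hr)
    have h2 := List.all_eq_true.mp h1 d hdm
    simp only [bIn_eq, bHas_eq, hin, Bool.not_true, Bool.false_or, Bool.or_eq_true, beq_iff_eq] at h2
    exact h2
  · intro hok
    refine List.all_eq_true.mpr (fun c hcR => List.all_eq_true.mpr (fun d hdm => ?_))
    by_cases hin : pvInSq y x g d = true
    · rcases hok c (hsound c hcR) d hdm hin with rfl | hgd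
      · simp [bIn_eq, bHas_eq]
      · simp [bIn_eq, bHas_eq, hgd]
    · have hf : pvInSq y x g d = false := by
        cases hv : pvInSq y x g d
        · rfl
        · exact absurd hv hin
      simp [bIn_eq, hf]

-- ---------- gluing ----------
lemma pvSearch_eq_bClear (y x g : Int) (park : List (List String)) (dy dx : List Int) (hg : 1 ≤ g) :
    pvSearch y x g park dy dx = bClear y x g park (mv4 dy dx) := by
  have h1 := pvSearch_char y x g park dy dx hg
  have h2 := bClear_char y x g park (mv4 dy dx)
  by_cases hok : pvOk park (mv4 dy dx) y x g
  · rw [h1.mpr hok, h2.mpr hok]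
  · cases hs : pvSearch y x g park dy dx with
    | true => exact absurd (h1.mp hs) hok
    | false =>
      cases hc : bClear y x g park (mv4 dy dx) with
      | true => exact absurd (h2.mp hc) hok
      | false => rfl

-- the zipped move list is the indexed one once both direction lists have 4 entries
lemma pvMovesEq (dy dx : List Int) (h1 : 4 ≤ dy.length) (h2 : 4 ≤ dx.length) :
    (dy.zip dx).take 4 = mv4 dy dx := by
  match dy, dx with
  | a :: b :: c :: d :: r, p :: q :: s :: t :: u =>
    show [(a, p), (b, q), (c, s), (d, t)] = mv4 (a :: b :: c :: d :: r) (p :: q :: s :: t :: u)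
    rw [mv4, show PySem.List.pyRange 0 4 1 = [0, 1, 2, 3] by decide]
    norm_num [PySem.List.pyGet?, PySem.List.pyIdx?]
    and_intros <;>
      (rw [if_pos (by omega)] <;>
        norm_num [show Int.toNat 1 = 1 from rfl, show Int.toNat 2 = 2 from rfl,
          show Int.toNat 3 = 3 from rfl])
  | [], _ | [_], _ | [_,_], _ | [_,_,_], _ => simp at h1
  | _ :: _ :: _ :: _ :: _, [] | _ :: _ :: _ :: _ :: _, [_]
  | _ :: _ :: _ :: _ :: _, [_,_] | _ :: _ :: _ :: _ :: _, [_,_,_] => simp at h2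

-- the descending while loop is find? over range(n, 0, -1)
lemma pvWhile_eq_find (y x : Int) (park : List (List String)) (dy dx : List Int)
    (M : List (Int × Int)) (hM : ∀ g : Int, 1 ≤ g → pvSearch y x g park dy dx = bClear y x g park M) :
    ∀ n : Nat, pvGunWhile y x park dy dx n =
      ((PySem.List.pyRange (n : Int) 0 (-1)).find? (fun g => bClear y x g park M)).getD 0 := by
  intro n
  induction n with
  | zero =>
    rw [PySem.List.pyRange_neg_one_eq_nil (by omega)]
    rfl
  | succ n ihn =>
    rw [show ((n + 1 : Nat) : Int) = (n : Int) + 1 by push_cast; ring,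
        PySem.List.pyRange_neg_one_cons (by omega : (0 : Int) < (n : Int) + 1),
        show ((n : Int) + 1 - 1) = (n : Int) by ring]
    have hgw : pvGunWhile y x park dy dx (n + 1) =
        if pvSearch y x ((n : Int) + 1) park dy dx then ((n : Int) + 1)
        else pvGunWhile y x park dy dx n := rfl
    rw [hgw, hM ((n : Int) + 1) (by omega)]
    by_cases hc : bClear y x ((n : Int) + 1) park M = true
    · rw [if_pos hc, List.find?_cons_of_pos (p := fun g => bClear y x g park M) hc]
      rfl
    · rw [if_neg hc, List.find?_cons_of_neg (p := fun g => bClear y x g park M) (by simp [hc]), ihn]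

-- the counting loop = 1 + recursive prefix count over the extracted values
lemma pvRun_eq_bArm (f : Int → String) :
    ∀ (L : List Int) (acc : Int), pvRun (fun i => f i == "-1") L acc = acc + bArm (L.map f) := by
  intro L
  induction L with
  | nil => intro acc; simp [pvRun, bArm]
  | cons i r ih =>
    intro acc
    show (if f i == "-1" then pvRun (fun i => f i == "-1") r (acc + 1) else acc) =
      acc + (if f i == "-1" then 1 + bArm (r.map f) else 0)
    by_cases hp : (f i == "-1") = true
    · rw [if_pos hp, if_pos hp, ih]
      ring
    · rw [if_neg hp, if_neg hp]
      ring

lemma bArm_nonneg : ∀ L : List String, 0 ≤ bArm L := by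
  intro L
  induction L with
  | nil => simp [bArm]
  | cons v r ih =>
    show 0 ≤ (if v == "-1" then 1 + bArm r else 0)
    split_ifs <;> omega

-- dis >= 2 forces the loop to have run: first index in range and its cell '-1'
lemma pvRun_two (p : Int → Bool) (a h0 : Int)
    (hge : 2 ≤ pvRun p (PySem.List.pyRange a h0 1) 1) :
    a < h0 ∧ p a = true := by
  by_cases hlt : a < h0
  · refine ⟨hlt, ?_⟩
    rw [PySem.List.pyRange_one_cons hlt] at hge
    by_cases hp : p a = true
    · exact hp
    · exfalso
      have : pvRun p (a :: PySem.List.pyRange (a + 1) h0 1) 1 = 1 := by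
        show (if p a then pvRun p (PySem.List.pyRange (a + 1) h0 1) 2 else 1) = 1
        rw [if_neg hp]
      omega
  · exfalso
    rw [PySem.List.pyRange_one_eq_nil (by omega)] at hge
    simp [pvRun] at hge

lemma gun_eq_gun_alt (y x : Int) (park : List (List String)) (dy dx : List Int)
    (hpre : Pre_gun y x park dy dx) : gun y x park dy dx = gun_alt y x park dy dx := by
  have hY : pvRun (fun i => pvGood park (i, x)) (PySem.List.pyRange (y + 1) (park.length : Int) 1) 1
      = 1 + bArm ((PySem.List.pyRange (y + 1) (park.length : Int) 1).map
          (fun i => (PySem.List.pyGet? ((PySem.List.pyGet? park i).getD []) x).getD "")) :=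
    pvRun_eq_bArm (fun i => (PySem.List.pyGet? ((PySem.List.pyGet? park i).getD []) x).getD "") _ 1
  have hX : pvRun (fun i => pvGood park (y, i))
        (PySem.List.pyRange (x + 1) ((((PySem.List.pyGet? park 0).getD []).length : Int)) 1) 1
      = 1 + bArm ((PySem.List.pyRange (x + 1) ((((PySem.List.pyGet? park 0).getD []).length : Int)) 1).map
          (fun j => (PySem.List.pyGet? ((PySem.List.pyGet? park y).getD []) j).getD "")) :=
    pvRun_eq_bArm (fun j => (PySem.List.pyGet? ((PySem.List.pyGet? park y).getD []) j).getD "") _ 1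
  simp only [gun, gun_alt, pvCalDis]
  rw [hY, hX]
  set aY := bArm ((PySem.List.pyRange (y + 1) (park.length : Int) 1).map
      (fun i => (PySem.List.pyGet? ((PySem.List.pyGet? park i).getD []) x).getD "")) with haY
  set aX := bArm ((PySem.List.pyRange (x + 1) ((((PySem.List.pyGet? park 0).getD []).length : Int)) 1).map
      (fun j => (PySem.List.pyGet? ((PySem.List.pyGet? park y).getD []) j).getD "")) with haX
  have hmin : min (1 + aY) (1 + aX) = 1 + min aY aX := by omega
  rw [hmin]
  by_cases hone : (1 + min aY aX == (1 : Int)) = true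
  · rw [if_pos hone, if_pos hone]
  · rw [if_neg hone, if_neg hone]
    -- best >= 2, hence both first cells are '-1' and Pre_gun supplies the move lengths
    have h0Y : 0 ≤ aY := bArm_nonneg _
    have h0X : 0 ≤ aX := bArm_nonneg _
    have hbest : 2 ≤ 1 + min aY aX := by
      have : ¬ (1 + min aY aX = 1) := by simpa using hone
      omega
    have hY2 : 2 ≤ pvRun (fun i => pvGood park (i, x)) (PySem.List.pyRange (y + 1) (park.length : Int) 1) 1 := by
      rw [hY]; omega
    have hX2 : 2 ≤ pvRun (fun i => pvGood park (y, i))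
        (PySem.List.pyRange (x + 1) ((((PySem.List.pyGet? park 0).getD []).length : Int)) 1) 1 := by
      rw [hX]; omega
    obtain ⟨hYlt, hYp⟩ := pvRun_two _ _ _ hY2
    obtain ⟨hXlt, hXp⟩ := pvRun_two _ _ _ hX2
    have hYc : (PySem.List.pyGet? ((PySem.List.pyGet? park (y + 1)).getD []) x).getD "" = "-1" := by
      have := hYp
      simp only [pvGood, pvCell] at this
      exact eq_of_beq this
    have hXc : (PySem.List.pyGet? ((PySem.List.pyGet? park y).getD []) (x + 1)).getD "" = "-1" := by
      have := hXp
      simp only [pvGood, pvCell] at this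
      exact eq_of_beq this
    obtain ⟨hpk, hrest⟩ := hpre
    rcases hrest with ⟨hh, hw⟩ | ⟨hw0, hrect, hyb, hxb, hlast⟩
    · omega
    · rcases hlast with hA | hB | hC
      · rcases hA with hA | hA
        · omega
        · exact absurd hYc hA
      · rcases hB with hB | hB
        · omega
        · exact absurd hXc hB
      · obtain ⟨_, _, _, _, hd4, hx4⟩ := hC
        rw [pvMovesEq dy dx hd4 hx4,
          pvWhile_eq_find y x park dy dx (mv4 dy dx)
            (fun g hg => pvSearch_eq_bClear y x g park dy dx hg) (1 + min aY aX).toNat,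
          Int.toNat_of_nonneg (by omega)]

-- ===== VERDICT (by name: the statement is the Claim_ definition above) =====
theorem gun_spec : Claim_equal_gun := by
  intro y x park dy dx _ hpre
  unfold Spec_gun
  exact gun_eq_gun_alt y x park dy dx hpre
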